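-- pv_equiv track=rewrite | github.com/ConnorJEckert/AOC | 2020/day5.py | getBinarySelection
-- ===== SOURCE A (Python) =====
-- import math
--
-- def getBinarySelection(inText, mx, mn):
--     max_n = mx
--     min_n = mn
--     for letter in inText:
--         if (letter == "L" or letter == "F"):
--             half = math.ceil((max_n-min_n)/2)
--             max_n = max_n - half
--         elif (letter == "R" or letter == "B"):
--             half = math.ceil((max_n-min_n)/2)
--             min_n = min_n + half
--     if (max_n == min_n):
--         return max_n
--     else:
--         return -1
-- ===== SOURCE B (Python) =====
-- def getBinarySelection(inText, mx, mn):
--     # Stage 1: keep only the recognized partition letters.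
--     letters = [c for c in inText if c in "LFRB"]
--     d = mx - mn
--     # Each recognized step maps the range size d to floor(d/2), so after k
--     # steps the size is d // 2**k: the range collapses iff that is 0.
--     if d // (2 ** len(letters)) != 0:
--         return -1
--     # The lower bound rises by ceil(size/2) exactly at upper-half (R/B)
--     # letters; the size before step j is d // 2**j, so that increment is
--     # d // 2**j - d // 2**(j+1), computed directly from the original d.
--     add = 0
--     for j, c in enumerate(letters):
--         if c in "RB":
--             add += d // (2 ** j) - d // (2 ** (j + 1))
--     return mn + add
-- ===== Notes on version B (the rewrite author's own statement) =====
-- stated objective: alternative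
-- what changed: Replaces A's single-pass narrowing of two running bounds by a staged closed-form computation: filter the recognized letters, decide collapse with one floor division d // 2**k of the original range size, and sum the lower-bound increments d//2**j - d//2**(j+1) computed directly from the original d by power-of-two divisions, with no running interval state.
import Mathlib
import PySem

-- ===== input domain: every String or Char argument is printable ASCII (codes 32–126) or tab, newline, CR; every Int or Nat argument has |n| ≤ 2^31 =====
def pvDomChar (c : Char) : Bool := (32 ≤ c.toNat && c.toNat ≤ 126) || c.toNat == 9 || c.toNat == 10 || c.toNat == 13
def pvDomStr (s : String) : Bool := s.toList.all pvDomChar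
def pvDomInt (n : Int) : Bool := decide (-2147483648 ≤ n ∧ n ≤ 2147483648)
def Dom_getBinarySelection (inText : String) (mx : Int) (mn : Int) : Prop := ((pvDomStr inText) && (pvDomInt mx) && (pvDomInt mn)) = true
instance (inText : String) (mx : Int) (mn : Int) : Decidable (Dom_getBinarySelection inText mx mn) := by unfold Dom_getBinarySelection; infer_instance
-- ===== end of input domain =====

-- B replaces A's running two-bound narrowing loop by a staged closed-form computation:
-- filter the recognized letters, test collapse by one floor division d // 2^k, and sum the
-- lower-bound increments d//2^j - d//2^(j+1) directly from the original range size (objective: alternative).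

-- ===== PORT A =====
-- math.ceil((max_n-min_n)/2): on Dom the difference has magnitude ≤ 2^32, so the float
-- division is exact and the ceiling equals the integer ceiling ⌈d/2⌉ = (d+1)//2 (floor div).
def pvStepA (st : Int × Int) (letter : Char) : Int × Int :=
  if letter = 'L' ∨ letter = 'F' then
    let half := PySem.Int.floordiv (st.1 - st.2 + 1) 2
    (st.1 - half, st.2)
  else if letter = 'R' ∨ letter = 'B' then
    let half := PySem.Int.floordiv (st.1 - st.2 + 1) 2
    (st.1, st.2 + half)
  else st

def getBinarySelection (inText : String) (mx : Int) (mn : Int) : Int :=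
  let p := inText.toList.foldl pvStepA (mx, mn)
  if p.1 = p.2 then p.1 else -1

-- ===== PORT B =====
-- `c in "LFRB"` / `c in "RB"` ported as membership of the char in the string's character list (exact).
def pvRel (c : Char) : Bool := "LFRB".toList.contains c
def pvRB (c : Char) : Bool := "RB".toList.contains c

-- the loop body `if c in "RB": add += d//2**j - d//2**(j+1)` over enumerate(letters);
-- indices produced by enumerate are ≥ 0, 2**j is ported as 2 ^ j.toNat
def pvStepB (d : Int) (acc : Int) (p : Int × Char) : Int :=
  if pvRB p.2 then
    acc + (PySem.Int.floordiv d (2 ^ p.1.toNat) - PySem.Int.floordiv d (2 ^ (p.1.toNat + 1)))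
  else acc

def getBinarySelection_alt (inText : String) (mx : Int) (mn : Int) : Int :=
  let letters := inText.toList.filter pvRel
  let d := mx - mn
  if PySem.Int.floordiv d (2 ^ letters.length) ≠ 0 then -1
  else mn + (PySem.List.enumerate letters).foldl (pvStepB d) 0

-- ===== PRECONDITION & SPEC =====
def Spec_getBinarySelection (inText : String) (mx : Int) (mn : Int) (out : Int) : Prop := out = getBinarySelection_alt inText mx mn
instance (inText : String) (mx : Int) (mn : Int) (out : Int) : Decidable (Spec_getBinarySelection inText mx mn out) := by unfold Spec_getBinarySelection; infer_instance

-- ===== CLAIM (what is proved, stated in full; the proofs are below) =====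
def Claim_equal_getBinarySelection : Prop := ∀ (inText : String) (mx : Int) (mn : Int), Dom_getBinarySelection inText mx mn → Spec_getBinarySelection inText mx mn (getBinarySelection inText mx mn)

-- ===== LEMMAS AND PROOFS =====

theorem pv_half_eq (d : Int) : d - PySem.Int.floordiv (d + 1) 2 = PySem.Int.floordiv d 2 := by
  rw [PySem.Int.floordiv_eq_ediv_of_pos (by norm_num), PySem.Int.floordiv_eq_ediv_of_pos (by norm_num)]
  omega

theorem pv_fdiv_one (d : Int) : PySem.Int.floordiv d 1 = d := by
  rw [PySem.Int.floordiv_eq_ediv_of_pos (by norm_num)]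
  exact Int.ediv_one d

theorem pv_fdiv_fdiv (d : Int) (j : Nat) :
    PySem.Int.floordiv (PySem.Int.floordiv d 2) (2 ^ j) = PySem.Int.floordiv d (2 ^ (j + 1)) := by
  rw [PySem.Int.floordiv_eq_ediv_of_pos (show (0:Int) < 2 by norm_num),
      PySem.Int.floordiv_eq_ediv_of_pos (show (0:Int) < 2^j by positivity),
      PySem.Int.floordiv_eq_ediv_of_pos (show (0:Int) < 2^(j+1) by positivity),
      Int.ediv_ediv_of_nonneg (by norm_num), pow_succ, mul_comm]

theorem pvRel_LF {c : Char} (h : c = 'L' ∨ c = 'F') : pvRel c = true := by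
  rcases h with h | h <;> subst h <;> decide

theorem pvRel_RB {c : Char} (h : c = 'R' ∨ c = 'B') : pvRel c = true := by
  rcases h with h | h <;> subst h <;> decide

theorem pvRB_LF {c : Char} (h : c = 'L' ∨ c = 'F') : pvRB c = false := by
  rcases h with h | h <;> subst h <;> decide

theorem pvRB_RB {c : Char} (h : c = 'R' ∨ c = 'B') : pvRB c = true := by
  rcases h with h | h <;> subst h <;> decide

theorem pvRel_false {c : Char} (h1 : c ≠ 'L') (h2 : c ≠ 'F') (h3 : c ≠ 'R') (h4 : c ≠ 'B') :
    pvRel c = false := by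
  simp [pvRel, h1, h2, h3, h4]

-- the recursive form of B's sum: the increment at the head uses d, the tail uses d // 2
def pvS (d : Int) : List Char → Int
  | [] => 0
  | c :: cs => (if pvRB c then d - PySem.Int.floordiv d 2 else 0) + pvS (PySem.Int.floordiv d 2) cs

-- shifting enumerate's start by one shifts the base of the floor divisions to d // 2
theorem pv_fold_shift (cs : List Char) (d : Int) :
    ∀ (acc : Int) (s : Nat),
    (PySem.List.enumerate cs ((s : Int) + 1)).foldl (pvStepB d) acc
      = (PySem.List.enumerate cs (s : Int)).foldl (pvStepB (PySem.Int.floordiv d 2)) acc := by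
  induction cs with
  | nil => intro acc s; simp [PySem.List.enumerate_nil]
  | cons c cs ih =>
      intro acc s
      rw [PySem.List.enumerate_cons, PySem.List.enumerate_cons]
      simp only [List.foldl_cons]
      have hstep : pvStepB d acc ((s : Int) + 1, c) = pvStepB (PySem.Int.floordiv d 2) acc ((s : Int), c) := by
        simp only [pvStepB]
        have ht1 : ((s : Int) + 1).toNat = s + 1 := by omega
        have ht2 : ((s : Int)).toNat = s := by omega
        rw [ht1, ht2, pv_fdiv_fdiv, pv_fdiv_fdiv]
      rw [hstep, show ((s : Int) + 1) = ((s + 1 : Nat) : Int) from by omega]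
      exact ih _ (s + 1)

-- B's enumerate-fold computes pvS
theorem pv_fold_eq_S (cs : List Char) : ∀ (d acc : Int),
    (PySem.List.enumerate cs 0).foldl (pvStepB d) acc = acc + pvS d cs := by
  induction cs with
  | nil => intro d acc; simp [PySem.List.enumerate_nil, pvS]
  | cons c cs ih =>
      intro d acc
      rw [PySem.List.enumerate_cons]
      simp only [List.foldl_cons]
      rw [show ((0 : Int) + 1) = (((0 : Nat) : Int) + 1) from by norm_num,
          pv_fold_shift, show (((0 : Nat) : Int)) = (0 : Int) from by norm_num, ih]
      simp only [pvStepB, pvS]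
      have ht : ((0 : Int)).toNat = 0 := rfl
      rw [ht]
      simp only [pow_zero, pv_fdiv_one, show (0 + 1 : Nat) = 1 from rfl, pow_one]
      by_cases h : pvRB c = true
      · simp only [h, if_true]; omega
      · simp only [Bool.not_eq_true] at h; simp only [h, Bool.false_eq_true, if_false]; omega

-- main invariant on A's fold: the running difference is d // 2^(relevant letters so far)
-- and the lower bound has risen by pvS of the relevant letters
theorem pv_foldA (l : List Char) : ∀ (M m : Int),
    (l.foldl pvStepA (M, m)).1 - (l.foldl pvStepA (M, m)).2
        = PySem.Int.floordiv (M - m) (2 ^ (l.filter pvRel).length)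
    ∧ (l.foldl pvStepA (M, m)).2 = m + pvS (M - m) (l.filter pvRel) := by
  induction l with
  | nil => intro M m; simp [pvS]
  | cons c l ih =>
      intro M m
      simp only [List.foldl_cons]
      by_cases hLF : c = 'L' ∨ c = 'F'
      · have hA : pvStepA (M, m) c = (M - PySem.Int.floordiv (M - m + 1) 2, m) := by
          simp only [pvStepA, if_pos hLF]
        rw [hA, List.filter_cons_of_pos (pvRel_LF hLF)]
        obtain ⟨ihd, ihs⟩ := ih (M - PySem.Int.floordiv (M - m + 1) 2) m
        have hd2 : M - PySem.Int.floordiv (M - m + 1) 2 - m = PySem.Int.floordiv (M - m) 2 := by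
          have := pv_half_eq (M - m); omega
        constructor
        · rw [ihd, hd2, List.length_cons, pv_fdiv_fdiv]
        · rw [ihs, hd2, pvS, pvRB_LF hLF]
          simp
      · by_cases hRB : c = 'R' ∨ c = 'B'
        · have hA : pvStepA (M, m) c = (M, m + PySem.Int.floordiv (M - m + 1) 2) := by
            simp only [pvStepA, if_neg hLF, if_pos hRB]
          rw [hA, List.filter_cons_of_pos (pvRel_RB hRB)]
          obtain ⟨ihd, ihs⟩ := ih M (m + PySem.Int.floordiv (M - m + 1) 2)
          have hd2 : M - (m + PySem.Int.floordiv (M - m + 1) 2) = PySem.Int.floordiv (M - m) 2 := by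
            have := pv_half_eq (M - m); omega
          constructor
          · rw [ihd, hd2, List.length_cons, pv_fdiv_fdiv]
          · rw [ihs, hd2, pvS, pvRB_RB hRB]
            simp only [if_true]
            have := pv_half_eq (M - m)
            omega
        · have h1 : c ≠ 'L' := fun h => hLF (Or.inl h)
          have h2 : c ≠ 'F' := fun h => hLF (Or.inr h)
          have h3 : c ≠ 'R' := fun h => hRB (Or.inl h)
          have h4 : c ≠ 'B' := fun h => hRB (Or.inr h)
          have hA : pvStepA (M, m) c = (M, m) := by
            simp only [pvStepA, if_neg hLF, if_neg hRB]
          rw [hA, List.filter_cons_of_neg (by simp [pvRel_false h1 h2 h3 h4])]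
          exact ih M m

-- ===== VERDICT (by name: the statement is the Claim_ definition above) =====
theorem getBinarySelection_spec : Claim_equal_getBinarySelection := by
  intro inText mx mn _
  obtain ⟨hd, hs⟩ := pv_foldA inText.toList mx mn
  simp only [Spec_getBinarySelection, getBinarySelection, getBinarySelection_alt]
  rw [pv_fold_eq_S]
  by_cases h : PySem.Int.floordiv (mx - mn) (2 ^ (inText.toList.filter pvRel).length) = 0
  · rw [if_pos (show (inText.toList.foldl pvStepA (mx, mn)).1 = (inText.toList.foldl pvStepA (mx, mn)).2 by omega),
        if_neg (not_not_intro h)]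
    omega
  · rw [if_neg (show ¬ (inText.toList.foldl pvStepA (mx, mn)).1 = (inText.toList.foldl pvStepA (mx, mn)).2 by omega),
        if_pos h]
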